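-- pv_equiv track=rewrite | github.com/prashant-juluri/securemr | ai/fix_agent.py | _extract_diff_lines
-- ===== SOURCE A (Python) =====
-- def _extract_diff_lines(text):
--
--     lines = text.splitlines()
--     diff_lines = []
--     collecting = False
--
--     for line in lines:
--         if line.startswith(("+", "-", "@@")):
--             diff_lines.append(line)
--             collecting = True
--         elif collecting and line.strip():
--             break
--
--     return "\n".join(diff_lines).strip()
-- ===== SOURCE B (Python) =====
-- def _extract_diff_lines(text):
--     lines = text.splitlines()
--
--     def is_diff(l):
--         return l.startswith(("+", "-", "@@"))
--
--     # phase 1: skip everything before the first diff-prefixed line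
--     i = 0
--     while i < len(lines) and not is_diff(lines[i]):
--         i += 1
--     # phase 2: the collecting window ends at the first non-blank non-diff line
--     j = i
--     while j < len(lines) and (is_diff(lines[j]) or not lines[j].strip()):
--         j += 1
--     # phase 3: keep only the diff-prefixed lines of the window
--     return "\n".join(l for l in lines[i:j] if is_diff(l)).strip()
-- ===== Notes on version B (the rewrite author's own statement) =====
-- stated objective: alternative
-- what changed: Replaces the single stateful loop with a collecting flag and break by a three-phase pipeline: scan to the first diff-prefixed line, scan on to the end of the window (diff or blank lines), then filter the window for diff-prefixed lines.
import Mathlib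
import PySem

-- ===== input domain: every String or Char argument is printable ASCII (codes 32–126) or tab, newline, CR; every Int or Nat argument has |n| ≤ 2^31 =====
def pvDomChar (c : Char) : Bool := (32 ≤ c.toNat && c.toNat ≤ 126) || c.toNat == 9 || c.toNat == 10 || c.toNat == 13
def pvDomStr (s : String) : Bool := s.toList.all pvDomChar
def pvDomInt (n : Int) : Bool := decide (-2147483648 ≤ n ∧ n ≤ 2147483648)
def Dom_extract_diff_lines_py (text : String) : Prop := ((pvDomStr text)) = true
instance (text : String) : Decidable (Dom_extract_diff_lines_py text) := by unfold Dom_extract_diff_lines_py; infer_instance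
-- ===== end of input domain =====

-- B replaces A's single stateful loop (collecting flag + break) by a three-phase
-- drop/take/filter pipeline over the lines; alternative decomposition, same cost.

-- ===== PORT A =====
-- the for-loop with its `collecting` flag and `break` (returning the accumulator)
def pvLoopA : List String → List String → Bool → List String
  | [], acc, _ => acc
  | l :: ls, acc, collecting =>
    if PySem.Str.startswith l "+" || PySem.Str.startswith l "-" || PySem.Str.startswith l "@@" then
      pvLoopA ls (acc ++ [l]) true
    else if collecting && !(PySem.Str.strip l == "") then acc
    else pvLoopA ls acc collecting

def extract_diff_lines_py (text : String) : String :=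
  PySem.Str.strip (PySem.Str.join "\n" (pvLoopA (PySem.Str.splitlines text) [] false))

-- ===== PORT B =====
def pvIsDiffB (l : String) : Bool :=
  PySem.Str.startswith l "+" || PySem.Str.startswith l "-" || PySem.Str.startswith l "@@"

def pvInWindowB (l : String) : Bool := pvIsDiffB l || PySem.Str.strip l == ""

def extract_diff_lines_py_alt (text : String) : String :=
  let lines := PySem.Str.splitlines text
  let tail := lines.dropWhile (fun l => !pvIsDiffB l)        -- phase 1
  let window := tail.takeWhile pvInWindowB                   -- phase 2
  PySem.Str.strip (PySem.Str.join "\n" (window.filter pvIsDiffB))  -- phase 3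

-- ===== PRECONDITION & SPEC =====
def Spec_extract_diff_lines_py (text : String) (out : String) : Prop := out = extract_diff_lines_py_alt text
instance (text : String) (out : String) : Decidable (Spec_extract_diff_lines_py text out) := by unfold Spec_extract_diff_lines_py; infer_instance

-- ===== CLAIM (what is proved, stated in full; the proofs are below) =====
def Claim_equal_extract_diff_lines_py : Prop := ∀ (text : String), Dom_extract_diff_lines_py text → Spec_extract_diff_lines_py text (extract_diff_lines_py text)

-- ===== LEMMAS AND PROOFS =====

lemma pvLoopA_cons (l : String) (ls acc : List String) (c : Bool) :
    pvLoopA (l :: ls) acc c =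
      if pvIsDiffB l then pvLoopA ls (acc ++ [l]) true
      else if c && !(PySem.Str.strip l == "") then acc
      else pvLoopA ls acc c := rfl

lemma pvLoopA_true (ls : List String) : ∀ acc,
    pvLoopA ls acc true = acc ++ (ls.takeWhile pvInWindowB).filter pvIsDiffB := by
  induction ls with
  | nil => intro acc; simp [pvLoopA]
  | cons l ls ih =>
    intro acc
    rw [pvLoopA_cons]
    by_cases hd : pvIsDiffB l = true
    · have hw : pvInWindowB l = true := by simp [pvInWindowB, hd]
      rw [if_pos hd, ih, List.takeWhile_cons_of_pos hw, List.filter_cons_of_pos hd]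
      simp
    · by_cases hb : (PySem.Str.strip l == "") = true
      · have hw : pvInWindowB l = true := by simp [pvInWindowB, hb]
        rw [if_neg hd, if_neg (by simp [hb]), ih,
            List.takeWhile_cons_of_pos hw, List.filter_cons_of_neg (by simp [hd])]
      · have hw : ¬ pvInWindowB l = true := by simp [pvInWindowB, hd, hb]
        rw [if_neg hd, if_pos (by simp_all), List.takeWhile_cons_of_neg hw]
        simp

lemma pvLoopA_false (ls : List String) : ∀ acc,
    pvLoopA ls acc false =
      acc ++ ((ls.dropWhile (fun l => !pvIsDiffB l)).takeWhile pvInWindowB).filter pvIsDiffB := by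
  induction ls with
  | nil => intro acc; simp [pvLoopA]
  | cons l ls ih =>
    intro acc
    rw [pvLoopA_cons]
    by_cases hd : pvIsDiffB l = true
    · have hw : pvInWindowB l = true := by simp [pvInWindowB, hd]
      rw [if_pos hd, pvLoopA_true, List.dropWhile_cons_of_neg (by simp [hd]),
          List.takeWhile_cons_of_pos hw, List.filter_cons_of_pos hd]
      simp
    · rw [if_neg hd, if_neg (by simp), ih, List.dropWhile_cons_of_pos (by simp [hd])]

-- ===== VERDICT (by name: the statement is the Claim_ definition above) =====
theorem extract_diff_lines_py_spec : Claim_equal_extract_diff_lines_py := by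
  intro text _
  unfold Spec_extract_diff_lines_py extract_diff_lines_py extract_diff_lines_py_alt
  rw [pvLoopA_false]
  simp
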